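-- pv_equiv track=rewrite | github.com/dstackai/dstack | cli/dstack/core/interpolation.py | validate
-- ===== SOURCE A (Python) =====
-- import string
-- from typing import Iterable, List, Optional
--
-- var_characters = set(string.digits + string.ascii_letters + "_")
--
-- after_dollar = var_characters | set("{$")
--
-- def validate(s: str, available_vars: Optional[Iterable[str]] = None) -> List[str]:
--     """
--     Validate if string could be interpolated. Supported syntax:
--     * $VAR_NAME
--     * ${VAR_NAME}
--     * escaped $$ dollar
--
--     Returns:
--         List of missed vars
--     Raises:
--         ValueError: if interpolation could not be done
--     """
--     available_vars = set([] if available_vars is None else available_vars)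
--     missed_vars = set()
--     start = 0
--     while start < len(s):
--         dollar = s.find("$", start)
--         if dollar == -1:
--             break
--         if dollar == len(s) - 1 or (s[dollar + 1] not in after_dollar):
--             raise ValueError("Unescaped $ sign")
--         elif s[dollar + 1] == "$":  # escape sequence $$
--             start = dollar + 2
--             continue
--         elif s[dollar + 1] == "{":
--             end = s.find("}", dollar + 2)
--             if end == -1:
--                 raise ValueError("Unexpected EOL")
--             name = s[dollar + 2 : end].strip()
--             if not all((c in var_characters) for c in name):
--                 raise ValueError(f"${name} contains illegal var characters")
--             if name not in available_vars:
--                 missed_vars.add(name)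
--             start = end + 1
--         else:
--             end = dollar + 1
--             while end < len(s) and s[end] in var_characters:
--                 end += 1
--             name = s[dollar + 1 : end]
--             if name not in available_vars:
--                 missed_vars.add(name)
--             start = end
--     return list(missed_vars)
-- ===== SOURCE B (Python) =====
-- import re
-- import string
--
-- var_characters = set(string.digits + string.ascii_letters + "_")
--
-- _token = re.compile(r"\$\$|\$\{([^}]*)\}|\$([A-Za-z0-9_]+)|\$")
--
-- def validate(s, available_vars=None):
--     available = set([] if available_vars is None else available_vars)
--     missed = set()
--     for m in _token.finditer(s):
--         text = m.group(0)
--         if text == "$$":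
--             continue
--         brace, word = m.group(1), m.group(2)
--         if brace is not None:
--             name = brace.strip()
--             if not all(c in var_characters for c in name):
--                 raise ValueError(f"${name} contains illegal var characters")
--             if name not in available:
--                 missed.add(name)
--         elif word is not None:
--             if word not in available:
--                 missed.add(word)
--         else:  # a lone '$' that no full token could absorb
--             if m.end() < len(s) and s[m.end()] == "{":
--                 raise ValueError("Unexpected EOL")
--             raise ValueError("Unescaped $ sign")
--     return list(missed)
-- ===== Notes on version B (the rewrite author's own statement) =====
-- stated objective: idiomatic
-- what changed: A's manual while-loop with str.find index bookkeeping and a hand-rolled inner character scan is replaced by a single compiled regex alternation (\$\$ | \$\{([^}]*)\} | \$([A-Za-z0-9_]+) | \$) iterated with re.finditer, classifying each token by its matched group.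
import Mathlib
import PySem

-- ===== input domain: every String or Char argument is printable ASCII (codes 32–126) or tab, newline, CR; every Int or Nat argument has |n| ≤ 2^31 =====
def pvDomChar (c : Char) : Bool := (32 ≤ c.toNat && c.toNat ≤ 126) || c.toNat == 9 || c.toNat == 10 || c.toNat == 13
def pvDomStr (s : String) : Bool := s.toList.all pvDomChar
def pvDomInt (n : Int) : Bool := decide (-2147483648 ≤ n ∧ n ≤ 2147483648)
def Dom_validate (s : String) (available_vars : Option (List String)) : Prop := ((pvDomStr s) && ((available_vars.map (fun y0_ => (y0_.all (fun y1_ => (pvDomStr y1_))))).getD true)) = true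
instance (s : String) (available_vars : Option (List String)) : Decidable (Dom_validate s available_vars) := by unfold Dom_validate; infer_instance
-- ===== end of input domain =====

-- B replaces A's manual index/find scanning loop by a single regex-alternation tokenizer
-- (re.finditer over $$ | ${...} | $word | $) consuming the string left to right; same cost, more idiomatic.
-- On inputs where the Python raises ValueError both ports return the missed-so-far set; Pre_validate excludes exactly those inputs.

-- `c in var_characters` (digits + ascii letters + '_')
def pvIsVar (c : Char) : Bool := c.isDigit || c.isAlpha || c == '_'
-- `c in after_dollar`
def pvAfterDollar (c : Char) : Bool := pvIsVar c || c == '{' || c == '$'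

-- ===== PORT A =====
-- the inner `while end < len(s) and s[end] in var_characters: end += 1`
def pvWordEnd (cs : List Char) (e : Nat) : Nat :=
  if h : e < cs.length then
    if pvIsVar (cs[e]'h) then pvWordEnd cs (e + 1) else e
  else e
termination_by cs.length - e

-- needed by pvLoopA's termination: `end` never moves left
theorem pvWordEnd_ge (cs : List Char) (e : Nat) : e ≤ pvWordEnd cs e := by
  unfold pvWordEnd
  split
  · split
    · have := pvWordEnd_ge cs (e + 1); omega
    · exact Nat.le_refl e
  · exact Nat.le_refl e
termination_by cs.length - e

-- needed by pvLoopA's termination: a successful find lies at or right of `start`, inside the string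
theorem pv_findFrom_facts (cs sub : List Char) (k : Nat) (hk : k ≤ cs.length)
    (hsub : sub ≠ []) (h : PySem.Chars.findFrom cs sub (k : Int) none ≠ -1) :
    k ≤ (PySem.Chars.findFrom cs sub (k : Int) none).toNat ∧
      (PySem.Chars.findFrom cs sub (k : Int) none).toNat < cs.length := by
  obtain ⟨h1, h2, -⟩ := PySem.Chars.findFrom_natCast_spec cs sub k hk h
  have hlen : (PySem.Chars.findFrom cs sub (k : Int) none).toNat < cs.length := by
    rcases h2 with ⟨t, ht⟩
    have : sub.length + t.length = (List.drop (PySem.Chars.findFrom cs sub (k : Int) none).toNat cs).length := by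
      rw [← ht]; simp
    have hlsub : 0 < sub.length := List.length_pos_iff.mpr hsub
    rw [List.length_drop] at this
    omega
  exact ⟨by omega, hlen⟩

-- the `while start < len(s)` loop of A
def pvLoopA (avail : PySem.Set String) (cs : List Char) (start : Nat) (missed : PySem.Set String) :
    PySem.Set String :=
  if hs : start < cs.length then
    if hd : PySem.Chars.findFrom cs ['$'] (start : Int) none = -1 then
      missed                                       -- break
    else
      have hfacts := pv_findFrom_facts cs ['$'] start (Nat.le_of_lt hs) (by simp) hd
      if hlast : (PySem.Chars.findFrom cs ['$'] (start : Int) none).toNat = cs.length - 1 then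
        missed                                     -- raise ValueError("Unescaped $ sign")
      else
        let d := (PySem.Chars.findFrom cs ['$'] (start : Int) none).toNat
        let c := cs.getD (d + 1) ' '
        if ¬ pvAfterDollar c then
          missed                                   -- raise ValueError("Unescaped $ sign")
        else if c == '$' then                      -- escape sequence $$
          pvLoopA avail cs (d + 2) missed
        else if c == '{' then
          if he : PySem.Chars.findFrom cs ['}'] ((d : Int) + 2) none = -1 then
            missed                                 -- raise ValueError("Unexpected EOL")
          else
            let e := PySem.Chars.findFrom cs ['}'] ((d : Int) + 2) none
            let name := PySem.Chars.strip (PySem.List.slice cs (some ((d : Int) + 2)) (some e))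
            if ¬ name.all pvIsVar then
              missed                               -- raise ValueError(f"${name} contains illegal var characters")
            else
              pvLoopA avail cs (e.toNat + 1)
                (if PySem.Set.contains avail (String.ofList name) then missed
                 else PySem.Set.add missed (String.ofList name))
        else
          let en := pvWordEnd cs (d + 1)
          let name := PySem.List.slice cs (some ((d : Int) + 1)) (some (en : Int))
          pvLoopA avail cs en
            (if PySem.Set.contains avail (String.ofList name) then missed
             else PySem.Set.add missed (String.ofList name))
  else missed
termination_by cs.length - start
decreasing_by
  · omega
  · have h2 := pv_findFrom_facts cs ['}'] ((PySem.Chars.findFrom cs ['$'] (start : Int) none).toNat + 2)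
      (by omega) (by simp) (by exact_mod_cast he)
    push_cast at h2
    omega
  · have := pvWordEnd_ge cs ((PySem.Chars.findFrom cs ['$'] (start : Int) none).toNat + 1)
    omega

def validate (s : String) (available_vars : Option (List String)) : List String :=
  pvLoopA (PySem.Set.ofList (available_vars.getD [])) s.toList 0 PySem.Set.empty

-- ===== PORT B =====
-- re.finditer over  \$\$ | \$\{([^}]*)\} | \$([A-Za-z0-9_]+) | \$ , left to right:
-- non-matching characters are skipped, at a '$' the alternatives are tried in order.
def pvLoopB (avail : PySem.Set String) (rest : List Char) (missed : PySem.Set String) :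
    PySem.Set String :=
  match rest with
  | [] => missed
  | a :: t =>
    if a == '$' then
      match t with
      | [] => missed                               -- lone '$': raise ValueError("Unescaped $ sign")
      | c :: r =>
        if c == '$' then pvLoopB avail r missed    -- token $$
        else if c == '{' then
          if r.dropWhile (fun x => x != '}') = [] then
            missed                                 -- lone '$' before '{': raise ValueError("Unexpected EOL")
          else                                     -- token ${...}: group(1) = chars before the first '}'
            let name := PySem.Chars.strip (r.takeWhile (fun x => x != '}'))
            if name.all pvIsVar then
              pvLoopB avail (r.dropWhile (fun x => x != '}')).tail
                (if PySem.Set.contains avail (String.ofList name) then missed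
                 else PySem.Set.add missed (String.ofList name))
            else missed                            -- raise ValueError(f"${name} contains illegal var characters")
        else if pvIsVar c then                     -- token $word, greedy
          let name := (c :: r).takeWhile pvIsVar
          pvLoopB avail ((c :: r).dropWhile pvIsVar)
            (if PySem.Set.contains avail (String.ofList name) then missed
             else PySem.Set.add missed (String.ofList name))
        else missed                                -- lone '$': raise ValueError("Unescaped $ sign")
    else pvLoopB avail t missed
termination_by rest.length
decreasing_by
  · simp
  · have h1 := List.length_dropWhile_le (fun x => x != '}') r
    have h2 := (r.dropWhile (fun x => x != '}')).length_tail
    simp only [List.length_cons]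
    omega
  · have h3 := List.length_dropWhile_le pvIsVar (c :: r)
    simp only [List.length_cons] at h3 ⊢
    omega
  · simp

def validate_alt (s : String) (available_vars : Option (List String)) : List String :=
  pvLoopB (PySem.Set.ofList (available_vars.getD [])) s.toList PySem.Set.empty

-- ===== PRECONDITION & SPEC =====
-- Pre_validate holds exactly when the Python returns (raises no ValueError): every "active" '$'
-- (one preceded by an even number of consecutive '$', i.e. not escaped) must be followed by '$',
-- a var character, or a '{'-group closed by '}' whose stripped content is all var characters.
def pvActive (cs : List Char) (i : Nat) : Bool :=
  ((cs.take i).reverse.takeWhile (fun c => c == '$')).length % 2 == 0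

def pvOkAt (cs : List Char) (i : Nat) : Bool :=
  if cs.getD i ' ' == '$' && pvActive cs i then
    match cs.drop (i + 1) with
    | [] => false
    | c :: r =>
      if c == '$' then true
      else if pvIsVar c then true
      else if c == '{' then
        match r.dropWhile (fun x => x != '}') with
        | _ :: _ => (PySem.Chars.strip (r.takeWhile (fun x => x != '}'))).all pvIsVar
        | [] => false
      else false
  else true

def Pre_validate (s : String) (_available_vars : Option (List String)) : Prop :=
  ((List.range s.toList.length).all fun i => pvOkAt s.toList i) = true

instance (s : String) (available_vars : Option (List String)) : Decidable (Pre_validate s available_vars) := by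
  unfold Pre_validate; infer_instance

def pvWitness_validate : String × Option (List String) := ("${ BAR } costs $$5, $FOO too", some ["BAR"])

def Spec_validate (s : String) (available_vars : Option (List String)) (out : List String) : Prop := out = validate_alt s available_vars
instance (s : String) (available_vars : Option (List String)) (out : List String) : Decidable (Spec_validate s available_vars out) := by unfold Spec_validate; infer_instance

-- ===== CLAIM (what is proved, stated in full; the proofs are below) =====
def Claim_equal_validate : Prop := ∀ (s : String) (available_vars : Option (List String)), Dom_validate s available_vars → Pre_validate s available_vars → Spec_validate s available_vars (validate s available_vars)

-- ===== LEMMAS AND PROOFS =====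

theorem pv_take_takeWhile (p : Char → Bool) (l : List Char) :
    l.take (l.takeWhile p).length = l.takeWhile p := by
  induction l with
  | nil => simp
  | cons a t ih => by_cases h : p a <;> simp [h, ih]

theorem pv_dropWhile_eq_drop (p : Char → Bool) (l : List Char) :
    l.dropWhile p = l.drop (l.takeWhile p).length := by
  induction l with
  | nil => simp
  | cons a t ih => by_cases h : p a <;> simp [h, ih]

theorem pv_split (p : Char → Bool) :
    ∀ (l : List Char) (j : Nat), j < l.length → (l.take j).all p = true →
      p (l.getD j ' ') = false →
      l.takeWhile p = l.take j ∧ l.dropWhile p = l.drop j := by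
  intro l
  induction l with
  | nil => intro j hj _ _; simp at hj
  | cons a t ih =>
    intro j hj hall hj2
    cases j with
    | zero =>
      simp only [List.getD_cons_zero] at hj2
      simp [hj2]
    | succ j' =>
      simp only [List.take_succ_cons, List.all_cons, Bool.and_eq_true] at hall
      simp only [List.getD_cons_succ] at hj2
      have := ih j' (by simpa using hj) hall.2 hj2
      simp [hall.1, this.1, this.2]

theorem pv_prefix_singleton_iff (c : Char) (cs : List Char) (i : Nat) (hi : i < cs.length) :
    [c] <+: cs.drop i ↔ c = cs[i] := by
  rw [List.drop_eq_getElem_cons hi, List.cons_prefix_cons]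
  simp

theorem pv_skipB (avail : PySem.Set String) :
    ∀ (seg rest : List Char) (missed : PySem.Set String), (∀ x ∈ seg, x ≠ '$') →
      pvLoopB avail (seg ++ rest) missed = pvLoopB avail rest missed := by
  intro seg
  induction seg with
  | nil => intro rest missed _; rw [List.nil_append]
  | cons a t ih =>
    intro rest missed h
    have ha : (a == '$') = false := by
      simpa using h a (by simp)
    rw [List.cons_append, pvLoopB.eq_def]
    simp only [ha, Bool.false_eq_true, if_false]
    exact ih rest missed (fun x hx => h x (by simp [hx]))

theorem pvWordEnd_eq (cs : List Char) (e : Nat) (he : e ≤ cs.length) :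
    pvWordEnd cs e = e + ((cs.drop e).takeWhile pvIsVar).length := by
  rw [pvWordEnd]
  split
  · rename_i h
    rw [List.drop_eq_getElem_cons h, List.takeWhile_cons]
    by_cases hv : pvIsVar cs[e] = true
    · simp only [hv, if_true]
      rw [pvWordEnd_eq cs (e + 1) (by omega)]
      simp only [List.length_cons]
      omega
    · simp only [Bool.not_eq_true] at hv
      simp [hv]
  · rename_i h
    have : cs.drop e = [] := List.drop_eq_nil_of_le (by omega)
    simp [this]
termination_by cs.length - e

theorem pv_loop_eq (avail : PySem.Set String) (N : Nat) :
    ∀ (cs : List Char) (start : Nat) (missed : PySem.Set String),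
      cs.length - start ≤ N → start ≤ cs.length →
      pvLoopA avail cs start missed = pvLoopB avail (cs.drop start) missed := by
  induction N with
  | zero =>
    intro cs start missed hN hle
    have hs : ¬ start < cs.length := by omega
    rw [pvLoopA, dif_neg hs, List.drop_eq_nil_of_le (by omega), pvLoopB.eq_def]
  | succ N ih =>
    intro cs start missed hN hle
    by_cases hs : start < cs.length
    · by_cases hd : PySem.Chars.findFrom cs ['$'] (start : Int) none = -1
      · -- no further '$': A breaks, B skips the whole tail
        rw [pvLoopA, dif_pos hs, dif_pos hd]
        have hno : ¬ ['$'] <:+: cs.drop start :=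
          (PySem.Chars.findFrom_natCast_eq_neg_one_iff cs ['$'] start hle).mp hd
        rw [List.singleton_infix_iff] at hno
        have hskip := pv_skipB avail (cs.drop start) [] missed
          (fun x hx hxe => hno (by rwa [hxe] at hx))
        simp only [List.append_nil] at hskip
        rw [hskip, pvLoopB.eq_def]
      · -- a '$' at index n = findFrom.toNat: B skips up to it, then both consume the same token
        obtain ⟨hge, hlt⟩ := pv_findFrom_facts cs ['$'] start hle (by simp) hd
        obtain ⟨-, hpre, hmin⟩ := PySem.Chars.findFrom_natCast_spec cs ['$'] start hle hd
        set n := (PySem.Chars.findFrom cs ['$'] (start : Int) none).toNat with hn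
        have hcsn : cs[n] = '$' := ((pv_prefix_singleton_iff '$' cs n hlt).mp hpre).symm
        -- B: skip the dollar-free segment [start, n)
        have hseg : cs.drop start = (cs.drop start).take (n - start) ++ cs.drop n := by
          have h1 : cs.drop n = (cs.drop start).drop (n - start) := by
            rw [List.drop_drop]; congr 1; omega
          rw [h1, List.take_append_drop]
        have hsegne : ∀ x ∈ (cs.drop start).take (n - start), x ≠ '$' := by
          intro x hx
          rw [List.mem_iff_getElem] at hx
          obtain ⟨i, hi, rfl⟩ := hx
          simp only [List.length_take, List.length_drop] at hi
          rw [List.getElem_take, List.getElem_drop]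
          intro hxe
          exact hmin (start + i) (by omega) (by omega)
            ((pv_prefix_singleton_iff '$' cs (start + i) (by omega)).mpr hxe.symm)
        rw [hseg, pv_skipB avail _ _ missed hsegne]
        have hdropn : cs.drop n = '$' :: cs.drop (n + 1) := by
          rw [List.drop_eq_getElem_cons hlt, hcsn]
        rw [pvLoopA, dif_pos hs, dif_neg hd]
        by_cases hlast : n = cs.length - 1
        · -- '$' is the last character: Python raises "Unescaped $ sign"
          rw [dif_pos (hn ▸ hlast), hdropn, List.drop_eq_nil_of_le (by omega), pvLoopB.eq_def]
          simp
        · rw [dif_neg (hn ▸ hlast)]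
          dsimp only
          rw [← hn]
          have hn1 : n + 1 < cs.length := by omega
          have hgetD : cs.getD (n + 1) ' ' = cs[n + 1] := List.getD_eq_getElem cs ' ' hn1
          have hdropn1 : cs.drop (n + 1) = cs[n + 1] :: cs.drop (n + 2) :=
            List.drop_eq_getElem_cons hn1
          rw [hgetD, hdropn, hdropn1, pvLoopB.eq_def]
          dsimp only
          simp only [beq_self_eq_true, if_true]
          by_cases hAD : pvAfterDollar cs[n + 1] = true
          · rw [if_neg (by simp [hAD])]
            by_cases hdol : cs[n + 1] = '$'
            · -- escape $$
              simp only [hdol, beq_self_eq_true, if_true]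
              exact ih cs (n + 2) missed (by omega) (by omega)
            · have hdolb : (cs[n + 1] == '$') = false := by simpa using hdol
              by_cases hbr : cs[n + 1] = '{'
              · -- ${...}
                have hbrt : (cs[n + 1] == '{') = true := by simp [hbr]
                simp only [hdolb, Bool.false_eq_true, if_false, hbrt, if_true]
                have hcast : ((n : Int) + 2) = ((n + 2 : Nat) : Int) := by push_cast; ring
                by_cases he : PySem.Chars.findFrom cs ['}'] ((n : Int) + 2) none = -1
                · -- no closing '}': Python raises "Unexpected EOL"
                  rw [dif_pos he]
                  rw [hcast] at he
                  have hno : ¬ ['}'] <:+: cs.drop (n + 2) :=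
                    (PySem.Chars.findFrom_natCast_eq_neg_one_iff cs ['}'] (n + 2) (by omega)).mp he
                  rw [List.singleton_infix_iff] at hno
                  have hnil : (cs.drop (n + 2)).dropWhile (fun x => x != '}') = [] := by
                    rw [List.dropWhile_eq_nil_iff]
                    intro x hx
                    simpa using fun hxe => hno (by rwa [hxe] at hx)
                  rw [if_pos hnil]
                · rw [dif_neg he]
                  simp only [hcast]
                  rw [hcast] at he
                  obtain ⟨hge2, hlt2⟩ := pv_findFrom_facts cs ['}'] (n + 2) (by omega) (by simp) he
                  obtain ⟨-, hpre2, hmin2⟩ :=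
                    PySem.Chars.findFrom_natCast_spec cs ['}'] (n + 2) (by omega) he
                  set m := (PySem.Chars.findFrom cs ['}'] ((n + 2 : Nat) : Int) none).toNat with hm
                  have hcsm : cs[m] = '}' :=
                    ((pv_prefix_singleton_iff '}' cs m hlt2).mp hpre2).symm
                  -- the regex group ([^}]*) is exactly s[n+2 : m]
                  have hsp := pv_split (fun x => x != '}') (cs.drop (n + 2)) (m - (n + 2))
                    (by simp; omega)
                    (by
                      rw [List.all_eq_true]
                      intro x hx
                      rw [List.mem_iff_getElem] at hx
                      obtain ⟨i, hi, rfl⟩ := hx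
                      simp only [List.length_take, List.length_drop] at hi
                      rw [List.getElem_take, List.getElem_drop]
                      simp only [bne_iff_ne, ne_eq]
                      intro hxe
                      exact hmin2 (n + 2 + i) (by omega) (by omega)
                        ((pv_prefix_singleton_iff '}' cs (n + 2 + i) (by omega)).mpr hxe.symm))
                    (by
                      have hg : (cs.drop (n + 2)).getD (m - (n + 2)) ' ' = cs[m] := by
                        rw [List.getD_eq_getElem _ ' ' (by simp; omega), List.getElem_drop]
                        congr 1; omega
                      rw [hg, hcsm]; simp)
                  have hdw : (cs.drop (n + 2)).dropWhile (fun x => x != '}') =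
                      '}' :: cs.drop (m + 1) := by
                    rw [hsp.2, List.drop_drop]
                    rw [show n + 2 + (m - (n + 2)) = m by omega]
                    rw [List.drop_eq_getElem_cons hlt2, hcsm]
                  have hname : PySem.List.slice cs (some ((n + 2 : Nat) : Int))
                      (some (PySem.Chars.findFrom cs ['}'] ((n + 2 : Nat) : Int) none)) =
                      (cs.drop (n + 2)).takeWhile (fun x => x != '}') := by
                    rw [hsp.1]
                    rw [PySem.List.slice_toNat cs (by omega) (by omega)]
                    congr 1
                  have hBne : ((cs.drop (n + 2)).dropWhile (fun x => x != '}')) ≠ [] := by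
                    rw [hdw]; simp
                  rw [if_neg hBne, hdw]
                  dsimp only [List.tail_cons]
                  rw [hname]
                  by_cases hleg : ((PySem.Chars.strip ((cs.drop (n + 2)).takeWhile
                      (fun x => x != '}'))).all pvIsVar) = true
                  · rw [if_neg (by simp [hleg]), if_pos hleg]
                    exact ih cs (m + 1) _ (by omega) (by omega)
                  · rw [if_pos (by simp [hleg]), if_neg hleg]
              · -- bare $word: pvAfterDollar and not '$'/'{' forces a var character
                have hbrb : (cs[n + 1] == '{') = false := by simpa using hbr
                have hvar : pvIsVar cs[n + 1] = true := by
                  unfold pvAfterDollar at hAD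
                  simpa [hdol, hbr] using hAD
                simp only [hbrb, hdolb, Bool.false_eq_true, if_false, hvar, if_true]
                have hen := pvWordEnd_eq cs (n + 1) (by omega)
                set j := ((cs.drop (n + 1)).takeWhile pvIsVar).length with hj
                have hjle : j ≤ cs.length - (n + 1) := by
                  have := (List.takeWhile_prefix (l := cs.drop (n + 1)) pvIsVar).length_le
                  simp only [List.length_drop] at this
                  omega
                have hname : PySem.List.slice cs (some ((n : Int) + 1))
                    (some ((pvWordEnd cs (n + 1) : Nat) : Int)) =
                    (cs.drop (n + 1)).takeWhile pvIsVar := by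
                  rw [hen]
                  rw [show ((n : Int) + 1) = ((n + 1 : Nat) : Int) by push_cast; ring]
                  rw [PySem.List.slice_toNat cs (by omega) (by omega)]
                  rw [show ((n + 1 + j : Nat) : Int).toNat - ((n + 1 : Nat) : Int).toNat = j by omega]
                  rw [show ((n + 1 : Nat) : Int).toNat = n + 1 by omega]
                  exact pv_take_takeWhile pvIsVar (cs.drop (n + 1))
                have hrest : (cs.drop (n + 1)).dropWhile pvIsVar = cs.drop (n + 1 + j) := by
                  rw [pv_dropWhile_eq_drop, ← hj, List.drop_drop]
                rw [← hdropn1, hname, hrest, hen]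
                exact ih cs (n + 1 + j) _ (by omega) (by omega)
          · -- raise ValueError("Unescaped $ sign")
            rw [if_pos (by simpa using hAD)]
            unfold pvAfterDollar at hAD
            simp only [Bool.or_eq_true, beq_iff_eq, not_or, Bool.not_eq_true] at hAD
            simp [hAD.1.2, hAD.2, hAD.1.1]
    · rw [pvLoopA, dif_neg hs, List.drop_eq_nil_of_le (by omega), pvLoopB.eq_def]

-- ===== VERDICT (by name: the statement is the Claim_ definition above) =====
theorem validate_spec : Claim_equal_validate := by
  intro s av _ _
  unfold Spec_validate validate validate_alt
  have := pv_loop_eq (PySem.Set.ofList (av.getD [])) s.toList.length s.toList 0 PySem.Set.empty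
    (by omega) (by omega)
  simpa using this
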